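-- pv_equiv track=rewrite | github.com/jussiiih/Python-ohjelmointia-tehokkailla-tietorakenteilla-ja-algoritmeilla | onechar.py | count
-- ===== SOURCE A (Python) =====
-- def count(s):
--     pituus=1
--     laskuri = 0
--     for i in range (0, len(s)):
--         if i < len(s)-1:
--             if s[i]==s[i+1]:
--                 laskuri += pituus
--                 pituus +=1
--             else:
--                 laskuri += pituus
--                 pituus = 1
--         elif i == len(s)-1:
--             if s[i]==s[i-1]:
--                 laskuri += pituus
--             else:
--                 laskuri += 1
--
--
--     return laskuri
-- ===== SOURCE B (Python) =====
-- def count(s):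
--     total = 0
--     i = 0
--     n = len(s)
--     while i < n:
--         j = i
--         while j < n and s[j] == s[i]:
--             j += 1
--         L = j - i
--         total += L * (L + 1) // 2
--         i = j
--     return total
-- ===== Notes on version B (the rewrite author's own statement) =====
-- stated objective: simpler
-- what changed: Replaces the per-character incremental counter with its special last-iteration branch by a two-pointer scan over maximal runs of equal characters, adding the closed-form triangular number L*(L+1)//2 per run.
import Mathlib
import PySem

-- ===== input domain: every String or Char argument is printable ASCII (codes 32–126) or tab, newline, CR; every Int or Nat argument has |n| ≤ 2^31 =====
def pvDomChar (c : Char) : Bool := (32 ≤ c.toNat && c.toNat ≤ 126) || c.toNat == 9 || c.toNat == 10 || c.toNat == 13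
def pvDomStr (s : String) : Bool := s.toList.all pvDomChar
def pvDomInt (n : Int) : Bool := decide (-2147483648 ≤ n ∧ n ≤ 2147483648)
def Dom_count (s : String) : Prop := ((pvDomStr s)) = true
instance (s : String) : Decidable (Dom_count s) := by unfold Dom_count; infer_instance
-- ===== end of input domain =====

-- B replaces A's per-character counter (with its special last-iteration branch) by a
-- two-pointer scan over maximal runs plus the closed-form L*(L+1)//2 per run (simpler).

-- ===== PORT A =====
-- literal body of A's for-loop: state (pituus, laskuri), index i
def countBody (cs : List Char) (n : Int) (st : Int × Int) (i : Int) : Int × Int :=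
  if i < n - 1 then
    if PySem.List.pyGetD cs i ' ' == PySem.List.pyGetD cs (i + 1) ' ' then
      (st.1 + 1, st.2 + st.1)
    else (1, st.2 + st.1)
  else if i == n - 1 then
    if PySem.List.pyGetD cs i ' ' == PySem.List.pyGetD cs (i - 1) ' ' then
      (st.1, st.2 + st.1)
    else (st.1, st.2 + 1)
  else st

def count (s : String) : Int :=
  let cs := s.toList
  let n : Int := PySem.Str.len s
  ((PySem.List.pyRange 0 n 1).foldl (countBody cs n) (1, 0)).2

-- ===== PORT B =====
-- L*(L+1)//2
def tri (L : Nat) : Int := PySem.Int.floordiv ((L : Int) * ((L : Int) + 1)) 2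

-- inner while loop: how far j advances past i (number of following chars equal to c)
def runLen (c : Char) : List Char → Nat
  | [] => 0
  | d :: ds => if d == c then 1 + runLen c ds else 0

-- outer while loop: consume one maximal run of length L, add tri L, continue at j
def countRuns : List Char → Int
  | [] => 0
  | c :: rest =>
      let L : Nat := 1 + runLen c rest
      tri L + countRuns (rest.drop (L - 1))
termination_by cs => cs.length
decreasing_by
  simp only [List.length_drop, List.length_cons]
  omega

def count_alt (s : String) : Int := countRuns s.toList

-- ===== PRECONDITION & SPEC =====
def Spec_count (s : String) (out : Int) : Prop := out = count_alt s
instance (s : String) (out : Int) : Decidable (Spec_count s out) := by unfold Spec_count; infer_instance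

-- ===== CLAIM (what is proved, stated in full; the proofs are below) =====
def Claim_equal_count : Prop := ∀ (s : String), Dom_count s → Spec_count s (count s)

-- ===== LEMMAS AND PROOFS =====

-- proof-side: A's remaining loop from a position with current char c, next char d
def G : Char → Char → List Char → Int → Int → Int
  | c, d, [], p, l => if c == d then l + p + (p + 1) else l + p + 1
  | c, d, e :: rest, p, l => if c == d then G d e rest (p + 1) (l + p) else G d e rest 1 (l + p)

-- proof-side: run lengths of the rest, the current run already holding k occurrences of c
def runGo (c : Char) (k : Nat) : List Char → List Nat
  | [] => [k]
  | d :: ds => if d == c then runGo c (k + 1) ds else k :: runGo d 1 ds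

lemma tri_succ (k : Nat) : tri (k + 1) = tri k + (k + 1 : Int) := by
  unfold tri
  rw [PySem.Int.floordiv_eq_ediv_of_pos (by omega), PySem.Int.floordiv_eq_ediv_of_pos (by omega)]
  push_cast
  have h : ((k : Int) + 1) * ((k : Int) + 1 + 1) = (k : Int) * ((k : Int) + 1) + 2 * ((k : Int) + 1) := by
    ring
  omega

lemma tri_zero : tri 0 = 0 := by decide

lemma tri_one : tri 1 = 1 := by decide

lemma countRuns_nil : countRuns [] = 0 := by
  rw [countRuns.eq_def]

lemma countRuns_cons (c : Char) (rest : List Char) :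
    countRuns (c :: rest) = tri (1 + runLen c rest) + countRuns (rest.drop (runLen c rest)) := by
  rw [countRuns.eq_def]
  simp only [Nat.add_sub_cancel_left]

lemma getElem?_of_drop {cs xs : List Char} {a k : Nat} {x : Char}
    (h : cs.drop a = xs) (hk : xs[k]? = some x) : cs[a + k]? = some x := by
  rw [← List.getElem?_drop, h, hk]

lemma pyGetD_of_drop {cs xs : List Char} {a k : Nat} {x : Char}
    (h : cs.drop a = xs) (hk : xs[k]? = some x) :
    PySem.List.pyGetD cs ((a : Int) + (k : Int)) ' ' = x := by
  have h1 : ((a : Int) + (k : Int)) = ((a + k : Nat) : Int) := by push_cast; ring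
  rw [h1, PySem.List.pyGetD_natCast, List.getD_eq_getElem?_getD, getElem?_of_drop h hk]
  rfl

lemma Aloop (cs : List Char) : ∀ (rest : List Char) (a : Nat) (c d : Char) (p l : Int),
    a + rest.length + 2 = cs.length →
    cs.drop a = c :: d :: rest →
    ((PySem.List.pyRange (a : Int) (cs.length : Int) 1).foldl (countBody cs (cs.length : Int)) (p, l)).2
      = G c d rest p l := by
  intro rest
  induction rest with
  | nil =>
    intro a c d p l hlen hdrop
    simp only [List.length_nil] at hlen
    have ga : PySem.List.pyGetD cs ((a : Int)) ' ' = c := by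
      have := pyGetD_of_drop (k := 0) hdrop (by rfl)
      simpa using this
    have ga1 : PySem.List.pyGetD cs ((a : Int) + 1) ' ' = d := by
      have := pyGetD_of_drop (k := 1) hdrop (by rfl)
      simpa using this
    rw [PySem.List.pyRange_one_cons (by omega), PySem.List.pyRange_one_cons (by omega)]
    have hnil : PySem.List.pyRange ((a : Int) + 1 + 1) (cs.length : Int) 1 = [] := by
      have he : ((a : Int) + 1 + 1) = (cs.length : Int) := by omega
      rw [he]; simp [PySem.List.pyRange]
    rw [hnil]
    simp only [List.foldl_cons, List.foldl_nil]
    have step1 : countBody cs (cs.length : Int) (p, l) (a : Int)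
        = if c == d then (p + 1, l + p) else (1, l + p) := by
      unfold countBody
      rw [if_pos (show (a : Int) < (cs.length : Int) - 1 by omega), ga, ga1]
    have step2 : ∀ st : Int × Int, countBody cs (cs.length : Int) st ((a : Int) + 1)
        = if d == c then (st.1, st.2 + st.1) else (st.1, st.2 + 1) := by
      intro st
      unfold countBody
      rw [if_neg (show ¬ ((a : Int) + 1 < (cs.length : Int) - 1) by omega)]
      rw [if_pos (show (((a : Int) + 1) == (cs.length : Int) - 1) = true from by
        simp only [beq_iff_eq]; omega)]
      rw [show ((a : Int) + 1 - 1) = (a : Int) by ring, ga, ga1]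
    rw [step1]
    by_cases hcd : c = d
    · subst hcd
      rw [if_pos (by simp), step2, if_pos (by simp)]
      simp [G]
    · rw [if_neg (by simp [hcd]), step2,
          if_neg (show ¬ ((d == c) = true) from by simp [beq_iff_eq]; exact fun h => hcd h.symm)]
      simp [G, beq_iff_eq, hcd]
  | cons e rs ih =>
    intro a c d p l hlen hdrop
    simp only [List.length_cons] at hlen
    have ga : PySem.List.pyGetD cs ((a : Int)) ' ' = c := by
      have := pyGetD_of_drop (k := 0) hdrop (by rfl)
      simpa using this
    have ga1 : PySem.List.pyGetD cs ((a : Int) + 1) ' ' = d := by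
      have := pyGetD_of_drop (k := 1) hdrop (by rfl)
      simpa using this
    have hdrop1 : cs.drop (a + 1) = d :: e :: rs := by
      have h := congrArg (List.drop 1) hdrop
      rw [List.drop_drop] at h
      exact h
    have hlen1 : (a + 1) + rs.length + 2 = cs.length := by
      omega
    rw [PySem.List.pyRange_one_cons (by omega)]
    simp only [List.foldl_cons]
    have hbody : countBody cs (cs.length : Int) (p, l) (a : Int)
        = if c == d then (p + 1, l + p) else (1, l + p) := by
      unfold countBody
      rw [if_pos (show (a : Int) < (cs.length : Int) - 1 by omega), ga, ga1]
    rw [hbody]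
    have hcast : (((a + 1 : Nat) : Int)) = (a : Int) + 1 := by push_cast; ring
    by_cases hcd : c = d
    · subst hcd
      rw [if_pos (by simp)]
      have hih := ih (a + 1) c e (p + 1) (l + p) hlen1 hdrop1
      rw [hcast] at hih
      rw [hih]
      simp [G]
    · rw [if_neg (by simp [hcd])]
      have hih := ih (a + 1) d e 1 (l + p) hlen1 hdrop1
      rw [hcast] at hih
      rw [hih]
      simp [G, beq_iff_eq, hcd]

lemma GB : ∀ (rest : List Char) (c d : Char) (k : Nat) (l : Int),
    G c d rest ((k : Int) + 1) l + tri k = l + ((runGo c (k + 1) (d :: rest)).map tri).sum := by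
  intro rest
  induction rest with
  | nil =>
    intro c d k l
    by_cases hcd : c = d
    · subst hcd
      simp only [G, runGo, beq_self_eq_true, if_true, List.map_cons, List.map_nil,
        List.sum_cons, List.sum_nil]
      rw [tri_succ (k + 1), tri_succ k]
      push_cast
      ring
    · have hdc : ¬ (d = c) := fun h => hcd h.symm
      simp only [G, runGo, beq_iff_eq, hcd, hdc, if_false, List.map_cons, List.map_nil,
        List.sum_cons, List.sum_nil]
      rw [tri_succ k, tri_one]
      ring
  | cons e rs ih =>
    intro c d k l
    by_cases hcd : c = d
    · subst hcd
      have hG : G c c (e :: rs) ((k : Int) + 1) l = G c e rs ((k : Int) + 1 + 1) (l + ((k : Int) + 1)) := by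
        simp [G]
      have hrg : runGo c (k + 1) (c :: e :: rs) = runGo c (k + 1 + 1) (e :: rs) := by
        rw [runGo]
        simp
      rw [hG, hrg]
      have hih := ih c e (k + 1) (l + ((k : Int) + 1))
      rw [show (((k + 1 : Nat) : Int)) = (k : Int) + 1 from by push_cast; ring] at hih
      rw [tri_succ k] at hih
      linarith [hih]
    · have hdc : ¬ (d = c) := fun h => hcd h.symm
      have hG : G c d (e :: rs) ((k : Int) + 1) l = G d e rs 1 (l + ((k : Int) + 1)) := by
        simp [G, beq_iff_eq, hcd]
      have hrg : runGo c (k + 1) (d :: e :: rs) = (k + 1) :: runGo d 1 (e :: rs) := by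
        rw [runGo]
        simp [beq_iff_eq, hdc]
      rw [hG, hrg]
      simp only [List.map_cons, List.sum_cons]
      have hih := ih d e 0 (l + ((k : Int) + 1))
      simp only [Nat.cast_zero, zero_add, tri_zero, add_zero] at hih
      rw [tri_succ k]
      linarith [hih]

lemma sumGo : ∀ (rest : List Char) (c : Char) (k : Nat),
    ((runGo c (k + 1) rest).map tri).sum
      = tri (k + 1 + runLen c rest) + countRuns (rest.drop (runLen c rest)) := by
  intro rest
  induction rest with
  | nil =>
    intro c k
    simp [runGo, runLen, countRuns_nil]
  | cons d ds ih =>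
    intro c k
    by_cases hdc : d = c
    · subst hdc
      have hrg : runGo d (k + 1) (d :: ds) = runGo d (k + 1 + 1) ds := by
        rw [runGo]
        simp
      have hrl : runLen d (d :: ds) = 1 + runLen d ds := by
        rw [runLen]
        simp
      rw [hrg, hrl, ih d (k + 1)]
      rw [show k + 1 + 1 + runLen d ds = k + 1 + (1 + runLen d ds) from by omega]
      rw [show (d :: ds).drop (1 + runLen d ds) = ds.drop (runLen d ds) from by
        rw [show 1 + runLen d ds = runLen d ds + 1 from by omega]
        rfl]
    · have hrg : runGo c (k + 1) (d :: ds) = (k + 1) :: runGo d 1 ds := by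
        rw [runGo]
        simp [beq_iff_eq, hdc]
      have hrl : runLen c (d :: ds) = 0 := by
        rw [runLen]
        simp [beq_iff_eq, hdc]
      rw [hrg, hrl]
      simp only [List.map_cons, List.sum_cons]
      have hih := ih d 0
      simp only [Nat.zero_add] at hih
      rw [hih]
      rw [show k + 1 + 0 = k + 1 from by omega, List.drop_zero, countRuns_cons]

-- ===== VERDICT (by name: the statement is the Claim_ definition above) =====
theorem count_spec : Claim_equal_count := by
  unfold Claim_equal_count Spec_count
  intro s _
  unfold count count_alt
  simp only [PySem.Str.len_eq]
  rcases hl : s.toList with _ | ⟨c, rest⟩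
  · simp [PySem.List.pyRange, countRuns_nil]
  · rcases rest with _ | ⟨d, rs⟩
    · rw [show ((([c] : List Char).length : Int)) = 1 from by simp]
      rw [PySem.List.pyRange_one_cons (by omega)]
      rw [show ((0 : Int) + 1) = 1 from by ring]
      have hnil : PySem.List.pyRange (1 : Int) 1 1 = [] := by simp [PySem.List.pyRange]
      rw [hnil]
      simp only [List.foldl_cons, List.foldl_nil]
      unfold countBody
      norm_num
      simp [countRuns_cons, countRuns_nil, runLen, tri_one]
    · have hA := Aloop (c :: d :: rs) rs 0 c d 1 0
        (by simp only [List.length_cons]; omega) (by simp)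
      simp only [Nat.cast_zero] at hA
      rw [hA]
      have hgb := GB rs c d 0 0
      simp only [Nat.cast_zero, zero_add, tri_zero, add_zero] at hgb
      rw [hgb]
      have hs := sumGo (d :: rs) c 0
      simp only [Nat.zero_add] at hs
      rw [hs, countRuns_cons]
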